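-- pv_equiv track=rewrite | github.com/ArnulfoPerez/python | edx/mit01/exam/longest.py | longest_run
-- ===== SOURCE A (Python) =====
-- def longest_run(L):
--     """
--     Assumes L is a list of integers containing at least 2 elements.
--     Finds the longest run of numbers in L, where the longest run can
--     either be monotonically increasing or monotonically decreasing.
--     In case of a tie for the longest run, choose the longest run
--     that occurs first.
--     Does not modify the list.
--     Returns the sum of the longest run.
--     """
--     def decr(a, b):
--         """
--         decreasing order
--         """
--         return not a < b
--     def incr(a, b):
--         """
--         increasing order
--         """
--         return not a > b
--     size = len(L)
--     longest_sequence = []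
--     ll = 0
--     for i in range(size):
--         def longest(order):
--             sequence = [L[i]]
--             for j in range(i+1, size):
--                 if order(L[j-1], L[j]):
--                     sequence.append(L[j])
--                 else:
--                     break
--             return sequence
--         sequence = longest(decr)
--         ls = len(sequence)
--         if ls > ll:
--             longest_sequence = sequence[:]
--             ll = ls
--         sequence = longest(incr)
--         ls = len(sequence)
--         if ls > ll:
--             longest_sequence = sequence[:]
--             ll = ls
--     return sum(longest_sequence)
-- ===== SOURCE B (Python) =====
-- def longest_run(L):
--     """O(n): one backward pass computing (length, sum) of the non-increasing and
--     non-decreasing run starting at each index, then one forward scan keeping the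
--     first strictly-longest run (decreasing checked first, as the tie rule demands)."""
--     n = len(L)
--     dec = [None] * n
--     inc = [None] * n
--     for i in range(n - 1, -1, -1):
--         if i + 1 < n and L[i] >= L[i + 1]:
--             l, s = dec[i + 1]
--             dec[i] = (l + 1, s + L[i])
--         else:
--             dec[i] = (1, L[i])
--         if i + 1 < n and L[i] <= L[i + 1]:
--             l, s = inc[i + 1]
--             inc[i] = (l + 1, s + L[i])
--         else:
--             inc[i] = (1, L[i])
--     ll, best = 0, 0
--     for i in range(n):
--         if dec[i][0] > ll:
--             ll, best = dec[i]
--         if inc[i][0] > ll: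
--             ll, best = inc[i]
--     return best
-- ===== Notes on version B (the rewrite author's own statement) =====
-- stated objective: faster
-- what changed: Replaced the per-index rebuilding of each run (quadratic nested scans) by one backward pass computing (length, sum) of the non-increasing and non-decreasing run starting at every index, followed by a single forward scan keeping the first strictly-longest run.
import Mathlib
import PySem

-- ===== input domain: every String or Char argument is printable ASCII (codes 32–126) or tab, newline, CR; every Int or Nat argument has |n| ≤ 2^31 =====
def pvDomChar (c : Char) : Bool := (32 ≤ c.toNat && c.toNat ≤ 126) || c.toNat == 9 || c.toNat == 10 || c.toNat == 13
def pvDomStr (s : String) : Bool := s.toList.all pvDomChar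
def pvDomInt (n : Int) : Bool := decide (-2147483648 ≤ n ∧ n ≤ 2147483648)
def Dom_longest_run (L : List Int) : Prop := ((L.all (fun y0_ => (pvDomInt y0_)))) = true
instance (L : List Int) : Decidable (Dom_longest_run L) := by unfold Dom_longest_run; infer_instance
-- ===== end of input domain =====

-- B replaces A's quadratic per-index run rebuilding by one backward pass of (length, sum)
-- pairs plus a single forward scan: same result, O(n) instead of O(n^2).

-- ===== PORT A =====
-- A's inner comparators: decr(a,b) = not a < b, incr(a,b) = not a > b
def pvDecrA (a b : Int) : Bool := !(decide (a < b))
def pvIncrA (a b : Int) : Bool := !(decide (a > b))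

-- the inner 'for j in range(i+1, size): … else break' loop of longest(order);
-- every index touched is < L.length, so getD's default 0 is never used (exact)
def pvSeqLoop (ord : Int → Int → Bool) (L : List Int) (j : Nat) : List Int :=
  if _h : j < L.length then
    if ord (L.getD (j - 1) 0) (L.getD j 0) then
      L.getD j 0 :: pvSeqLoop ord L (j + 1)
    else []
  else []
termination_by L.length - j

-- sequence = [L[i]] extended by the loop above
def pvLongestAt (ord : Int → Int → Bool) (L : List Int) (i : Nat) : List Int :=
  L.getD i 0 :: pvSeqLoop ord L (i + 1)

-- the outer 'for i in range(size)' loop with state (longest_sequence, ll)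
def pvOuter (L : List Int) (i : Nat) (seq : List Int) (ll : Nat) : List Int :=
  if _h : i < L.length then
    let sd := pvLongestAt pvDecrA L i
    let p := if sd.length > ll then (sd, sd.length) else (seq, ll)
    let si := pvLongestAt pvIncrA L i
    let q := if si.length > p.2 then (si, si.length) else p
    pvOuter L (i + 1) q.1 q.2
  else seq
termination_by L.length - i

def longest_run (L : List Int) : Int := (pvOuter L 0 [] 0).sum

-- ===== PORT B =====
-- backward pass: (length, sum) of the ord-run starting at each index
def pvRuns (ord : Int → Int → Bool) : List Int → List (Nat × Int)
  | [] => []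
  | [a] => [(1, a)]
  | a :: b :: rest =>
    match pvRuns ord (b :: rest) with
    | (l, s) :: r =>
      if ord a b then (l + 1, s + a) :: (l, s) :: r else (1, a) :: (l, s) :: r
    | [] => [(1, a)]

-- forward scan keeping the first strictly-longest run (dec checked before inc)
def pvScan : List ((Nat × Int) × (Nat × Int)) → Nat → Int → Int
  | [], _, best => best
  | (d, i) :: rest, ll, best =>
    let p := if d.1 > ll then (d.1, d.2) else (ll, best)
    let q := if i.1 > p.1 then (i.1, i.2) else p
    pvScan rest q.1 q.2

def pvGE (a b : Int) : Bool := decide (a ≥ b)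
def pvLE (a b : Int) : Bool := decide (a ≤ b)

def longest_run_alt (L : List Int) : Int :=
  pvScan ((pvRuns pvGE L).zip (pvRuns pvLE L)) 0 0

-- ===== PRECONDITION & SPEC =====
def Spec_longest_run (L : List Int) (out : Int) : Prop := out = longest_run_alt L
instance (L : List Int) (out : Int) : Decidable (Spec_longest_run L out) := by unfold Spec_longest_run; infer_instance

-- ===== CLAIM (what is proved, stated in full; the proofs are below) =====
def Claim_equal_longest_run : Prop := ∀ (L : List Int), Dom_longest_run L → Spec_longest_run L (longest_run L)

-- ===== LEMMAS AND PROOFS =====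

theorem pvDecrA_eq_GE : pvDecrA = pvGE := by
  funext a b
  by_cases h : a < b
  · simp [pvDecrA, pvGE, h, not_le.mpr h]
  · simp [pvDecrA, pvGE, h, not_lt.mp h]

theorem pvIncrA_eq_LE : pvIncrA = pvLE := by
  funext a b
  by_cases h : b < a
  · simp [pvIncrA, pvLE, h, not_le.mpr h]
  · simp [pvIncrA, pvLE, h, not_lt.mp h]

theorem pvSeqLoop_eq (ord : Int → Int → Bool) (L : List Int) (j : Nat) :
    pvSeqLoop ord L j =
      if j < L.length then
        (if ord (L.getD (j - 1) 0) (L.getD j 0) then L.getD j 0 :: pvSeqLoop ord L (j + 1) else [])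
      else [] := by
  rw [pvSeqLoop]
  by_cases h : j < L.length <;> simp [h]

theorem pvRuns_step (ord : Int → Int → Bool) (a b : Int) (rest : List Int)
    (l : Nat) (s : Int) (r : List (Nat × Int)) (h : pvRuns ord (b :: rest) = (l, s) :: r) :
    pvRuns ord (a :: b :: rest) =
      (if ord a b then (l + 1, s + a) else (1, a)) :: (l, s) :: r := by
  rw [show pvRuns ord (a :: b :: rest) =
    (match pvRuns ord (b :: rest) with
     | (l, s) :: r =>
       if ord a b then (l + 1, s + a) :: (l, s) :: r else (1, a) :: (l, s) :: r
     | [] => [(1, a)]) from rfl, h]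
  by_cases hb : ord a b = true <;> simp [hb]

-- head of pvRuns on the suffix L.drop i is exactly (length, sum) of A's sequence at i
theorem pvRuns_drop_head (ord : Int → Int → Bool) (L : List Int) (i : Nat) (hi : i < L.length) :
    pvRuns ord (L.drop i) =
      ((pvLongestAt ord L i).length, (pvLongestAt ord L i).sum) :: pvRuns ord (L.drop (i + 1)) := by
  induction hn : L.length - i generalizing i with
  | zero => omega
  | succ n ih =>
    have hdrop : L.drop i = L.getD i 0 :: L.drop (i + 1) := by
      rw [List.getD_eq_getElem L 0 hi]
      exact (List.getElem_cons_drop hi).symm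
    by_cases h2 : i + 1 < L.length
    · have hdrop2 : L.drop (i + 1) = L.getD (i + 1) 0 :: L.drop (i + 2) := by
        rw [List.getD_eq_getElem L 0 h2]
        exact (List.getElem_cons_drop h2).symm
      have ihs := ih (i + 1) h2 (by omega)
      have hseq : pvSeqLoop ord L (i + 1) =
          if ord (L.getD i 0) (L.getD (i + 1) 0) then
            L.getD (i + 1) 0 :: pvSeqLoop ord L (i + 1 + 1) else [] := by
        rw [pvSeqLoop_eq]
        simp [h2]
      have hstep := pvRuns_step ord (L.getD i 0) (L.getD (i + 1) 0) (L.drop (i + 1 + 1))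
        _ _ _ (by rw [← hdrop2]; exact ihs)
      rw [show L.drop (i + 2) = L.drop (i + 1 + 1) from rfl] at hdrop2
      rw [hdrop, hdrop2, hstep, ← hdrop2, ihs]
      simp only [pvLongestAt] at *
      congr 1
      by_cases hord : ord (L.getD i 0) (L.getD (i + 1) 0) = true
      · rw [if_pos hord, hseq, if_pos hord]
        simp only [List.length_cons, List.sum_cons, Prod.mk.injEq]
        exact ⟨trivial, by ring⟩
      · rw [if_neg hord, hseq, if_neg hord]
        simp
    · have hnil : L.drop (i + 1) = [] := List.drop_eq_nil_of_le (by omega)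
      have hseq : pvSeqLoop ord L (i + 1) = [] := by
        rw [pvSeqLoop_eq]
        simp [h2]
      rw [hdrop, hnil]
      simp [pvLongestAt, hseq, pvRuns]

-- the outer loop at index i agrees with B's scan over the suffix, given sum seq = best
theorem pvOuter_eq_scan (L : List Int) (i : Nat) (seq : List Int) (ll : Nat) (best : Int)
    (hsum : seq.sum = best) :
    (pvOuter L i seq ll).sum =
      pvScan ((pvRuns pvGE (L.drop i)).zip (pvRuns pvLE (L.drop i))) ll best := by
  induction hn : L.length - i generalizing i seq ll best with
  | zero =>
    have hi : ¬ i < L.length := by omega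
    have hd : L.drop i = [] := List.drop_eq_nil_of_le (by omega)
    rw [pvOuter]
    simp [hi, hd, pvRuns, pvScan, hsum]
  | succ n ih =>
    have hi : i < L.length := by omega
    have hdec := pvRuns_drop_head pvGE L i hi
    have hinc := pvRuns_drop_head pvLE L i hi
    rw [pvOuter]
    simp only [hi, dif_pos]
    rw [hdec, hinc, List.zip_cons_cons, pvScan]
    rw [pvDecrA_eq_GE, pvIncrA_eq_LE]
    set sd := pvLongestAt pvGE L i with hsd
    set si := pvLongestAt pvLE L i with hsi
    by_cases h1 : sd.length > ll
    · simp only [if_pos h1]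
      by_cases h2 : si.length > sd.length
      · simp only [if_pos h2]
        exact ih (i + 1) si si.length si.sum rfl (by omega)
      · simp only [if_neg h2]
        exact ih (i + 1) sd sd.length sd.sum rfl (by omega)
    · simp only [if_neg h1]
      by_cases h2 : si.length > ll
      · simp only [if_pos h2]
        exact ih (i + 1) si si.length si.sum rfl (by omega)
      · simp only [if_neg h2]
        exact ih (i + 1) seq ll best hsum (by omega)

-- ===== VERDICT (by name: the statement is the Claim_ definition above) =====
theorem longest_run_spec : Claim_equal_longest_run := by
  intro L _
  show longest_run L = longest_run_alt L
  unfold longest_run longest_run_alt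
  simpa using pvOuter_eq_scan L 0 [] 0 0 rfl
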